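-- pv_equiv track=rewrite | github.com/MzeeTez/Phonetic-Aware-Deep-Learning-for-Robust-Sentiment-Analysis-in-Code-Mixed-Text | phonetic_encoder.py | _romanised_hindi_to_phonemes
-- ===== SOURCE A (Python) =====
-- _ITRANS_MAP = [
--     # digraphs first (greedy longest-match)
--     ("aa", "AA"), ("ii", "II"), ("uu", "UU"), ("ee", "EE"), ("oo", "OO"),
--     ("ai", "AI"), ("au", "AU"), ("ch", "CH"), ("sh", "SH"), ("th", "TH"),
--     ("ph", "PH"), ("gh", "GH"), ("dh", "DH"), ("bh", "BH"), ("kh", "KH"),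
--     ("jh", "JH"), ("nh", "NH"), ("ny", "NY"), ("ng", "NG"), ("rh", "RH"),
--     ("gy", "GY"), ("py", "PY"), ("ky", "KY"), ("vy", "VY"), ("ty", "TY"),
--     ("dy", "DY"), ("ly", "LY"), ("sy", "SY"), ("my", "MY"), ("ny", "NY"),
--     # single vowels
--     ("a", "A"), ("i", "I"), ("u", "U"), ("e", "E"), ("o", "O"),
--     # single consonants
--     ("k", "K"), ("g", "G"), ("c", "C"), ("j", "J"), ("t", "T"),
--     ("d", "D"), ("n", "N"), ("p", "P"), ("b", "B"), ("m", "M"),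
--     ("y", "Y"), ("r", "R"), ("l", "L"), ("v", "V"), ("w", "W"),
--     ("s", "S"), ("h", "H"), ("f", "F"), ("z", "Z"), ("x", "X"),
--     ("q", "Q"),
-- ]
--
-- def _romanised_hindi_to_phonemes(word: str) -> list[str]:
--     """
--     Greedy ITRANS decomposition of a Romanised Hindi word.
--     "pyaar"  → ["PY", "AA", "R"]
--     "nahi"   → ["N", "A", "H", "I"]
--     "bhaiya" → ["BH", "AI", "Y", "A"]
--     """
--     s = word.lower()
--     phonemes = []
--     i = 0
--     while i < len(s):
--         matched = False
--         for itrans, phoneme in _ITRANS_MAP: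
--             if s[i:].startswith(itrans):
--                 phonemes.append(phoneme)
--                 i += len(itrans)
--                 matched = True
--                 break
--         if not matched:
--             # Unknown character — keep as uppercase literal
--             phonemes.append(s[i].upper())
--             i += 1
--     return phonemes if phonemes else ["<UNK_PHONE>"]
-- ===== SOURCE B (Python) =====
-- _ITRANS_MAP = [
--     # digraphs first (greedy longest-match)
--     ("aa", "AA"), ("ii", "II"), ("uu", "UU"), ("ee", "EE"), ("oo", "OO"),
--     ("ai", "AI"), ("au", "AU"), ("ch", "CH"), ("sh", "SH"), ("th", "TH"),
--     ("ph", "PH"), ("gh", "GH"), ("dh", "DH"), ("bh", "BH"), ("kh", "KH"),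
--     ("jh", "JH"), ("nh", "NH"), ("ny", "NY"), ("ng", "NG"), ("rh", "RH"),
--     ("gy", "GY"), ("py", "PY"), ("ky", "KY"), ("vy", "VY"), ("ty", "TY"),
--     ("dy", "DY"), ("ly", "LY"), ("sy", "SY"), ("my", "MY"), ("ny", "NY"),
--     # single vowels
--     ("a", "A"), ("i", "I"), ("u", "U"), ("e", "E"), ("o", "O"),
--     # single consonants
--     ("k", "K"), ("g", "G"), ("c", "C"), ("j", "J"), ("t", "T"),
--     ("d", "D"), ("n", "N"), ("p", "P"), ("b", "B"), ("m", "M"),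
--     ("y", "Y"), ("r", "R"), ("l", "L"), ("v", "V"), ("w", "W"),
--     ("s", "S"), ("h", "H"), ("f", "F"), ("z", "Z"), ("x", "X"),
--     ("q", "Q"),
-- ]
--
-- # staged pipeline: (1) segment into token lengths using only the digraph set,
-- # (2) cut the string into tokens, (3) map each token through a single dict.
-- _DIGRAPH_SET = frozenset(it for it, _ in _ITRANS_MAP if len(it) == 2)
-- _PHONEME = {it: ph for it, ph in _ITRANS_MAP}
--
--
-- def _romanised_hindi_to_phonemes(word: str) -> list[str]:
--     s = word.lower()
--     # pass 1: token lengths (2 where a digraph starts, else 1)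
--     lengths = []
--     i = 0
--     while i < len(s):
--         step = 2 if s[i:i + 2] in _DIGRAPH_SET else 1
--         lengths.append(step)
--         i += step
--     # pass 2: cut s into tokens
--     tokens = []
--     i = 0
--     for L in lengths:
--         tokens.append(s[i:i + L])
--         i += L
--     # pass 3: map tokens to phonemes (unknown -> uppercase literal)
--     out = [_PHONEME.get(t, t.upper()) for t in tokens]
--     return out if out else ["<UNK_PHONE>"]
-- ===== Notes on version B (the rewrite author's own statement) =====
-- stated objective: faster
-- what changed: Replaces A's single greedy loop with an ordered startswith-scan of the 57-entry table at every position by a staged pipeline: a segmentation pass computing token lengths from a digraph set, a pass cutting the string into tokens, and a final dict map of tokens to phonemes (unknown token -> its uppercase); set/dict lookups remove the inner table scan.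
import Mathlib
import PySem

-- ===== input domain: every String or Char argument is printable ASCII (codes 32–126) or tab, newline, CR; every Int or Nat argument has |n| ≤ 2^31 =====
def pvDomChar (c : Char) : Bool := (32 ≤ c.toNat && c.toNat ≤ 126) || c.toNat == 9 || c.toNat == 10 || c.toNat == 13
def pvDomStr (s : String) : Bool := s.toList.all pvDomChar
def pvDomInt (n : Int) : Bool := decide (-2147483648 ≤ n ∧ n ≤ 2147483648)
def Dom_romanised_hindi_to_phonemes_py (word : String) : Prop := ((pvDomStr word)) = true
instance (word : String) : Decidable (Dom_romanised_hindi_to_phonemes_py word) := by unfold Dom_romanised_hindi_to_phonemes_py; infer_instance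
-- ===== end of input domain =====

-- B replaces A's single greedy loop with an inner ordered table scan by a staged pipeline:
-- segment into token lengths using only the digraph set, cut the string into tokens, then
-- map each token through one phoneme dict; set/dict lookups remove the inner table scan (measured faster).

-- ===== PORT A =====
-- the ITRANS table, keys as char lists (transliteration of _ITRANS_MAP)
def pvTableA : List (List Char × String) :=
  [(['a', 'a'], "AA"),
  (['i', 'i'], "II"),
  (['u', 'u'], "UU"),
  (['e', 'e'], "EE"),
  (['o', 'o'], "OO"),
  (['a', 'i'], "AI"),
  (['a', 'u'], "AU"),
  (['c', 'h'], "CH"),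
  (['s', 'h'], "SH"),
  (['t', 'h'], "TH"),
  (['p', 'h'], "PH"),
  (['g', 'h'], "GH"),
  (['d', 'h'], "DH"),
  (['b', 'h'], "BH"),
  (['k', 'h'], "KH"),
  (['j', 'h'], "JH"),
  (['n', 'h'], "NH"),
  (['n', 'y'], "NY"),
  (['n', 'g'], "NG"),
  (['r', 'h'], "RH"),
  (['g', 'y'], "GY"),
  (['p', 'y'], "PY"),
  (['k', 'y'], "KY"),
  (['v', 'y'], "VY"),
  (['t', 'y'], "TY"),
  (['d', 'y'], "DY"),
  (['l', 'y'], "LY"),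
  (['s', 'y'], "SY"),
  (['m', 'y'], "MY"),
  (['n', 'y'], "NY"),
  (['a'], "A"),
  (['i'], "I"),
  (['u'], "U"),
  (['e'], "E"),
  (['o'], "O"),
  (['k'], "K"),
  (['g'], "G"),
  (['c'], "C"),
  (['j'], "J"),
  (['t'], "T"),
  (['d'], "D"),
  (['n'], "N"),
  (['p'], "P"),
  (['b'], "B"),
  (['m'], "M"),
  (['y'], "Y"),
  (['r'], "R"),
  (['l'], "L"),
  (['v'], "V"),
  (['w'], "W"),
  (['s'], "S"),
  (['h'], "H"),
  (['f'], "F"),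
  (['z'], "Z"),
  (['x'], "X"),
  (['q'], "Q")]

-- the inner 'for itrans, phoneme in _ITRANS_MAP: if s[i:].startswith(itrans)' loop
def pvScanA : List (List Char × String) → List Char → Option (String × Nat)
  | [], _ => none
  | (it, ph) :: tl, s => if it.isPrefixOf s then some (ph, it.length) else pvScanA tl s

-- the 'while i < len(s)' loop; fuel = remaining length bounds the iteration count (each step consumes ≥ 1 char)
def pvGoA : Nat → List Char → List String
  | 0, _ => []
  | _, [] => []
  | fuel + 1, c :: rest =>
    match pvScanA pvTableA (c :: rest) with
    | some (ph, len) => ph :: pvGoA fuel ((c :: rest).drop len)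
    | none => PySem.Str.upper (String.ofList [c]) :: pvGoA fuel rest

def romanised_hindi_to_phonemes_py (word : String) : List String :=
  let s := (PySem.Str.lower word).toList
  let phonemes := pvGoA s.length s
  if phonemes.isEmpty then ["<UNK_PHONE>"] else phonemes

-- ===== PORT B =====
-- _DIGRAPH_SET: the set of 2-char ITRANS keys (s[i:i+2] is looked up as a string)
def pvDgSet : PySem.Set String := PySem.Set.ofList
  ["aa", "ii", "uu", "ee", "oo", "ai", "au", "ch", "sh", "th",
   "ph", "gh", "dh", "bh", "kh", "jh", "nh", "ny", "ng", "rh",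
   "gy", "py", "ky", "vy", "ty", "dy", "ly", "sy", "my", "ny"]

-- _PHONEME: one dict over ALL ITRANS keys (token string -> phoneme)
def pvPhon : PySem.Dict String String := PySem.Dict.ofList
  [("aa", "AA"), ("ii", "II"), ("uu", "UU"), ("ee", "EE"), ("oo", "OO"),
   ("ai", "AI"), ("au", "AU"), ("ch", "CH"), ("sh", "SH"), ("th", "TH"),
   ("ph", "PH"), ("gh", "GH"), ("dh", "DH"), ("bh", "BH"), ("kh", "KH"),
   ("jh", "JH"), ("nh", "NH"), ("ny", "NY"), ("ng", "NG"), ("rh", "RH"),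
   ("gy", "GY"), ("py", "PY"), ("ky", "KY"), ("vy", "VY"), ("ty", "TY"),
   ("dy", "DY"), ("ly", "LY"), ("sy", "SY"), ("my", "MY"), ("ny", "NY"),
   ("a", "A"), ("i", "I"), ("u", "U"), ("e", "E"), ("o", "O"),
   ("k", "K"), ("g", "G"), ("c", "C"), ("j", "J"), ("t", "T"),
   ("d", "D"), ("n", "N"), ("p", "P"), ("b", "B"), ("m", "M"),
   ("y", "Y"), ("r", "R"), ("l", "L"), ("v", "V"), ("w", "W"),
   ("s", "S"), ("h", "H"), ("f", "F"), ("z", "Z"), ("x", "X"),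
   ("q", "Q")]

-- pass 1: token lengths (s[i:i+2] at the last position is a 1-char string, never in the set)
def pvLens : List Char → List Nat
  | [] => []
  | [_] => [1]
  | c1 :: c2 :: rest =>
    if PySem.Set.contains pvDgSet (String.ofList [c1, c2]) then 2 :: pvLens rest
    else 1 :: pvLens (c2 :: rest)

-- pass 2: cut s into tokens of those lengths
def pvCut : List Nat → List Char → List String
  | [], _ => []
  | l :: ls, s => String.ofList (s.take l) :: pvCut ls (s.drop l)

-- pass 3: _PHONEME.get(t, t.upper())
def pvMapTok (t : String) : String := (pvPhon.get? t).getD (PySem.Str.upper t)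

def romanised_hindi_to_phonemes_py_alt (word : String) : List String :=
  let s := (PySem.Str.lower word).toList
  let out := (pvCut (pvLens s) s).map pvMapTok
  if out.isEmpty then ["<UNK_PHONE>"] else out

-- ===== PRECONDITION & SPEC =====
def Spec_romanised_hindi_to_phonemes_py (word : String) (out : List String) : Prop := out = romanised_hindi_to_phonemes_py_alt word
instance (word : String) (out : List String) : Decidable (Spec_romanised_hindi_to_phonemes_py word out) := by unfold Spec_romanised_hindi_to_phonemes_py; infer_instance

-- ===== CLAIM (what is proved, stated in full; the proofs are below) =====
def Claim_equal_romanised_hindi_to_phonemes_py : Prop := ∀ (word : String), Dom_romanised_hindi_to_phonemes_py word → Spec_romanised_hindi_to_phonemes_py word (romanised_hindi_to_phonemes_py word)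

-- ===== LEMMAS AND PROOFS =====

-- proof-only helpers: A's table keyed by char pairs / chars, in table order
def pvDgFull : List ((Char × Char) × String) := [(('a','a'), "AA"), (('i','i'), "II"), (('u','u'), "UU"), (('e','e'), "EE"), (('o','o'), "OO"), (('a','i'), "AI"), (('a','u'), "AU"), (('c','h'), "CH"), (('s','h'), "SH"), (('t','h'), "TH"), (('p','h'), "PH"), (('g','h'), "GH"), (('d','h'), "DH"), (('b','h'), "BH"), (('k','h'), "KH"), (('j','h'), "JH"), (('n','h'), "NH"), (('n','y'), "NY"), (('n','g'), "NG"), (('r','h'), "RH"), (('g','y'), "GY"), (('p','y'), "PY"), (('k','y'), "KY"), (('v','y'), "VY"), (('t','y'), "TY"), (('d','y'), "DY"), (('l','y'), "LY"), (('s','y'), "SY"), (('m','y'), "MY"), (('n','y'), "NY")]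
def pvDgDedup : List ((Char × Char) × String) := [(('a','a'), "AA"), (('i','i'), "II"), (('u','u'), "UU"), (('e','e'), "EE"), (('o','o'), "OO"), (('a','i'), "AI"), (('a','u'), "AU"), (('c','h'), "CH"), (('s','h'), "SH"), (('t','h'), "TH"), (('p','h'), "PH"), (('g','h'), "GH"), (('d','h'), "DH"), (('b','h'), "BH"), (('k','h'), "KH"), (('j','h'), "JH"), (('n','h'), "NH"), (('n','y'), "NY"), (('n','g'), "NG"), (('r','h'), "RH"), (('g','y'), "GY"), (('p','y'), "PY"), (('k','y'), "KY"), (('v','y'), "VY"), (('t','y'), "TY"), (('d','y'), "DY"), (('l','y'), "LY"), (('s','y'), "SY"), (('m','y'), "MY")]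
def pvSgItems : List (Char × String) := [('a', "A"), ('i', "I"), ('u', "U"), ('e', "E"), ('o', "O"), ('k', "K"), ('g', "G"), ('c', "C"), ('j', "J"), ('t', "T"), ('d', "D"), ('n', "N"), ('p', "P"), ('b', "B"), ('m', "M"), ('y', "Y"), ('r', "R"), ('l', "L"), ('v', "V"), ('w', "W"), ('s', "S"), ('h', "H"), ('f', "F"), ('z', "Z"), ('x', "X"), ('q', "Q")]
def pvDg : PySem.Dict (Char × Char) String := PySem.Dict.mk pvDgDedup
def pvSg : PySem.Dict Char String := PySem.Dict.mk pvSgItems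
def pvPairs2 (l : List ((Char × Char) × String)) : List (List Char × String) :=
  l.map (fun p => ([p.1.1, p.1.2], p.2))
def pvPairs1 (l : List (Char × String)) : List (List Char × String) :=
  l.map (fun p => ([p.1], p.2))
-- B's dicts re-expressed over the same keyed lists
def pvF2 (p : (Char × Char) × String) : String × String := (String.ofList [p.1.1, p.1.2], p.2)
def pvF1 (p : Char × String) : String × String := (String.ofList [p.1], p.2)

theorem pvProdBeq (a b c1 c2 : Char) :
    (((a, b) : Char × Char) == (c1, c2)) = (a == c1 && b == c2) := rfl

theorem pvOfListBeq (l m : List Char) : (String.ofList l == String.ofList m) = (l == m) := by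
  by_cases h : l = m
  · simp [h]
  · have : String.ofList l ≠ String.ofList m := by
      intro hc; exact h (by simpa using congrArg String.toList hc)
    simp [h, this]

theorem pvTableA_split : pvTableA = pvPairs2 pvDgFull ++ pvPairs1 pvSgItems := by decide

set_option maxRecDepth 4096 in
theorem pvPhon_mk : pvPhon = PySem.Dict.mk (pvDgDedup.map pvF2 ++ pvSgItems.map pvF1) := by decide
theorem pvDgSet_eq : pvDgSet = pvDgDedup.map (fun p => String.ofList [p.1.1, p.1.2]) := by decide
theorem pvDgFull_eq : pvDgFull = pvDgDedup ++ [(('n','y'), "NY")] := by decide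

theorem pvGet_mk_nil {κ ν : Type} [BEq κ] (k : κ) :
    (PySem.Dict.mk ([] : List (κ × ν))).get? k = none := rfl

theorem pvGet_mk_append {κ ν : Type} [BEq κ] (l1 l2 : List (κ × ν)) (k : κ) :
    (PySem.Dict.mk (l1 ++ l2)).get? k
      = ((PySem.Dict.mk l1).get? k).or ((PySem.Dict.mk l2).get? k) := by
  induction l1 with
  | nil => simp [pvGet_mk_nil, Option.or]
  | cons p tl ih =>
    obtain ⟨a, v⟩ := p
    simp only [List.cons_append, PySem.Dict.get?_mk_cons, ih]
    by_cases h : a == k <;> simp [h, Option.or]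

theorem pvScanA_append (l1 l2 : List (List Char × String)) (s : List Char) :
    pvScanA (l1 ++ l2) s = (pvScanA l1 s).or (pvScanA l2 s) := by
  induction l1 with
  | nil => simp [pvScanA, Option.or]
  | cons p tl ih =>
    obtain ⟨it, ph⟩ := p
    simp only [List.cons_append, pvScanA, ih]
    by_cases h : it.isPrefixOf s <;> simp [h, Option.or]

theorem pvScanA_pairs2 (l : List ((Char × Char) × String)) (c1 c2 : Char) (rest : List Char) :
    pvScanA (pvPairs2 l) (c1 :: c2 :: rest)
      = ((PySem.Dict.mk l).get? (c1, c2)).map (fun ph => (ph, 2)) := by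
  induction l with
  | nil => simp [pvPairs2, pvScanA, pvGet_mk_nil]
  | cons p tl ih =>
    obtain ⟨⟨a, b⟩, ph⟩ := p
    simp only [pvPairs2, List.map_cons, pvScanA, PySem.Dict.get?_mk_cons, pvProdBeq] at *
    simp only [List.isPrefixOf, Bool.and_true]
    by_cases h : (a == c1 && b == c2) <;> simp [h, ih]

theorem pvScanA_pairs2_one (l : List ((Char × Char) × String)) (c : Char) :
    pvScanA (pvPairs2 l) [c] = none := by
  induction l with
  | nil => simp [pvPairs2, pvScanA]
  | cons p tl ih =>
    obtain ⟨⟨a, b⟩, ph⟩ := p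
    simp [pvPairs2, pvScanA, List.isPrefixOf]
    simpa [pvPairs2] using ih

theorem pvScanA_pairs1 (l : List (Char × String)) (c : Char) (rest : List Char) :
    pvScanA (pvPairs1 l) (c :: rest)
      = ((PySem.Dict.mk l).get? c).map (fun ph => (ph, 1)) := by
  induction l with
  | nil => simp [pvPairs1, pvScanA, pvGet_mk_nil]
  | cons p tl ih =>
    obtain ⟨a, ph⟩ := p
    simp only [pvPairs1, List.map_cons, pvScanA, PySem.Dict.get?_mk_cons] at *
    simp only [List.isPrefixOf, Bool.and_true]
    by_cases h : a == c <;> simp [h, ih]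

-- the duplicate ("ny","NY") at the tail of the table is harmless: same key, same value
theorem pvDgFull_get (k : Char × Char) :
    (PySem.Dict.mk pvDgFull).get? k = pvDg.get? k := by
  rw [pvDgFull_eq, pvGet_mk_append]
  show _ = pvDg.get? k
  by_cases h : pvDg.get? k = none
  · rw [show (PySem.Dict.mk pvDgDedup).get? k = pvDg.get? k from rfl, h]
    have hk : ¬ ((('n','y') : Char × Char) == k) := by
      intro hc
      rw [show k = (('n','y') : Char × Char) from (beq_iff_eq.mp hc).symm] at h
      revert h; decide
    simp [PySem.Dict.get?_mk_cons, hk, pvGet_mk_nil, Option.or]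
  · obtain ⟨v, hv⟩ := Option.ne_none_iff_exists'.mp h
    rw [show (PySem.Dict.mk pvDgDedup).get? k = pvDg.get? k from rfl, hv]
    simp [Option.or]

theorem pvScanA_one (c : Char) :
    pvScanA pvTableA [c] = (pvSg.get? c).map (fun ph => (ph, 1)) := by
  rw [pvTableA_split, pvScanA_append, pvScanA_pairs2_one, pvScanA_pairs1]
  simp [Option.or, pvSg]

theorem pvScanA_two (c1 c2 : Char) (rest : List Char) :
    pvScanA pvTableA (c1 :: c2 :: rest)
      = ((pvDg.get? (c1, c2)).map (fun ph => (ph, 2))).or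
          ((pvSg.get? c1).map (fun ph => (ph, 1))) := by
  rw [pvTableA_split, pvScanA_append, pvScanA_pairs2, pvScanA_pairs1, pvDgFull_get]
  rfl

-- B-side bridges: contains/lookup on the string-keyed structures = pair/char-keyed lookups
theorem pvContains_mapped (l : List ((Char × Char) × String)) (c1 c2 : Char) :
    (l.map (fun p => String.ofList [p.1.1, p.1.2])).contains (String.ofList [c1, c2])
      = ((PySem.Dict.mk l).get? (c1, c2)).isSome := by
  induction l with
  | nil => simp [pvGet_mk_nil]
  | cons p tl ih =>
    obtain ⟨⟨a, b⟩, ph⟩ := p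
    simp only [List.map_cons, List.contains_cons, PySem.Dict.get?_mk_cons, pvOfListBeq,
      List.cons_beq_cons, pvProdBeq]
    rw [ih]
    by_cases h1 : a = c1
    · subst h1
      by_cases h2 : b = c2
      · subst h2; simp
      · have h2' : c2 ≠ b := Ne.symm h2
        simp [h2, h2']
    · have h1' : c1 ≠ a := Ne.symm h1
      simp [h1, h1']

theorem pvGet_mapped2 (l : List ((Char × Char) × String)) (c1 c2 : Char) :
    (PySem.Dict.mk (l.map pvF2)).get? (String.ofList [c1, c2])
      = (PySem.Dict.mk l).get? (c1, c2) := by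
  induction l with
  | nil => simp [pvGet_mk_nil]
  | cons p tl ih =>
    obtain ⟨⟨a, b⟩, ph⟩ := p
    simp only [List.map_cons, pvF2, PySem.Dict.get?_mk_cons, pvOfListBeq, pvProdBeq]
    simp only [List.cons_beq_cons]
    by_cases h : (a == c1 && b == c2) <;> simp [h, ih]

theorem pvGet_mapped2_one (l : List ((Char × Char) × String)) (c : Char) :
    (PySem.Dict.mk (l.map pvF2)).get? (String.ofList [c]) = none := by
  induction l with
  | nil => simp [pvGet_mk_nil]
  | cons p tl ih =>
    obtain ⟨⟨a, b⟩, ph⟩ := p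
    simp only [List.map_cons, pvF2, PySem.Dict.get?_mk_cons, pvOfListBeq]
    simp [ih]

theorem pvGet_mapped1_two (l : List (Char × String)) (c1 c2 : Char) :
    (PySem.Dict.mk (l.map pvF1)).get? (String.ofList [c1, c2]) = none := by
  induction l with
  | nil => simp [pvGet_mk_nil]
  | cons p tl ih =>
    obtain ⟨a, ph⟩ := p
    simp only [List.map_cons, pvF1, PySem.Dict.get?_mk_cons, pvOfListBeq]
    simp [ih]

theorem pvGet_mapped1 (l : List (Char × String)) (c : Char) :
    (PySem.Dict.mk (l.map pvF1)).get? (String.ofList [c]) = (PySem.Dict.mk l).get? c := by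
  induction l with
  | nil => simp [pvGet_mk_nil]
  | cons p tl ih =>
    obtain ⟨a, ph⟩ := p
    simp only [List.map_cons, pvF1, PySem.Dict.get?_mk_cons, pvOfListBeq]
    simp only [List.cons_beq_cons]
    by_cases h : a == c <;> simp [h, ih]

theorem pvDgSet_contains (c1 c2 : Char) :
    PySem.Set.contains pvDgSet (String.ofList [c1, c2]) = (pvDg.get? (c1, c2)).isSome := by
  rw [show PySem.Set.contains pvDgSet (String.ofList [c1, c2])
        = pvDgSet.contains (String.ofList [c1, c2]) from rfl, pvDgSet_eq]
  exact pvContains_mapped pvDgDedup c1 c2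

theorem pvPhon_two (c1 c2 : Char) :
    pvPhon.get? (String.ofList [c1, c2]) = pvDg.get? (c1, c2) := by
  rw [pvPhon_mk, pvGet_mk_append, pvGet_mapped2, pvGet_mapped1_two]
  cases h : pvDg.get? (c1, c2) <;> simp [Option.or, pvDg] at * <;> simp [h]

theorem pvPhon_one (c : Char) :
    pvPhon.get? (String.ofList [c]) = pvSg.get? c := by
  rw [pvPhon_mk, pvGet_mk_append, pvGet_mapped2_one, pvGet_mapped1]
  simp [Option.or, pvSg]

theorem pvGoA_nil (fuel : Nat) : pvGoA fuel [] = [] := by cases fuel <;> rfl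

theorem pvGoA_eq_pipeline (fuel : Nat) (s : List Char) (h : s.length ≤ fuel) :
    pvGoA fuel s = (pvCut (pvLens s) s).map pvMapTok := by
  induction fuel generalizing s with
  | zero =>
    have : s = [] := List.length_eq_zero_iff.mp (Nat.le_zero.mp h)
    subst this; rfl
  | succ fuel ih =>
    match s with
    | [] => rfl
    | [c] =>
      rw [show pvGoA (fuel + 1) [c]
            = (match pvScanA pvTableA [c] with
               | some (ph, len) => ph :: pvGoA fuel ([c].drop len)
               | none => PySem.Str.upper (String.ofList [c]) :: pvGoA fuel []) from rfl,
          pvScanA_one]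
      have hm : pvMapTok (String.ofList [c]) = (pvSg.get? c).getD (PySem.Str.upper (String.ofList [c])) := by
        rw [pvMapTok, pvPhon_one]
      cases hc : pvSg.get? c with
      | some ph => simp [pvLens, pvCut, hc, hm, List.drop, pvGoA_nil]
      | none => simp [pvLens, pvCut, hc, hm, pvGoA_nil]
    | c1 :: c2 :: rest =>
      rw [show pvGoA (fuel + 1) (c1 :: c2 :: rest)
            = (match pvScanA pvTableA (c1 :: c2 :: rest) with
               | some (ph, len) => ph :: pvGoA fuel ((c1 :: c2 :: rest).drop len)
               | none => PySem.Str.upper (String.ofList [c1]) :: pvGoA fuel (c2 :: rest)) from rfl,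
          pvScanA_two]
      have hlen : (c2 :: rest).length ≤ fuel := by simpa using Nat.le_of_succ_le_succ h
      rw [show pvLens (c1 :: c2 :: rest)
            = (if PySem.Set.contains pvDgSet (String.ofList [c1, c2]) then 2 :: pvLens rest
               else 1 :: pvLens (c2 :: rest)) from rfl, pvDgSet_contains]
      cases hd : pvDg.get? (c1, c2) with
      | some ph =>
        have hm : pvMapTok (String.ofList [c1, c2]) = ph := by
          rw [pvMapTok, pvPhon_two, hd]; rfl
        have := ih rest (by simp at h; omega)
        simp [pvCut, Option.or, hm, this]
      | none =>
        have hm : pvMapTok (String.ofList [c1]) = (pvSg.get? c1).getD (PySem.Str.upper (String.ofList [c1])) := by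
          rw [pvMapTok, pvPhon_one]
        cases hs : pvSg.get? c1 with
        | some ph => simp [pvCut, hs, hm, Option.or, ih (c2 :: rest) hlen]
        | none => simp [pvCut, hs, hm, Option.or, ih (c2 :: rest) hlen]

-- ===== VERDICT (by name: the statement is the Claim_ definition above) =====
theorem romanised_hindi_to_phonemes_py_spec : Claim_equal_romanised_hindi_to_phonemes_py := by
  intro word _
  show romanised_hindi_to_phonemes_py word = romanised_hindi_to_phonemes_py_alt word
  simp only [romanised_hindi_to_phonemes_py, romanised_hindi_to_phonemes_py_alt]
  rw [pvGoA_eq_pipeline _ _ le_rfl]
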